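-- pv_equiv track=rewrite | github.com/ctl456/geetest_cracker | main.py | parse_string_to_wordarray
-- ===== SOURCE A (Python) =====
-- def parse_string_to_wordarray(text):
--     """将字符串转换为 WordArray 格式"""
--     length = len(text)
--     words = []
--
--     for i in range(length):
--         # 计算在 words 数组中的索引
--         word_index = i >> 2  # 相当于 i // 4
--
--         # 确保 words 数组足够长
--         while len(words) <= word_index:
--             words.append(0)
--
--         # 获取字符的 ASCII 码
--         char_code = ord(text[i]) & 0xFF
--
--         # 计算位移量
--         shift = 24 - (i % 4) * 8
--
--         # 将字符添加到对应的 word 中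
--         words[word_index] |= char_code << shift
--
--     return words
-- ===== SOURCE B (Python) =====
-- def parse_string_to_wordarray(text):
--     """将字符串转换为 WordArray 格式"""
--     words = []
--     start = 0
--     while start < len(text):
--         chunk = text[start:start + 4]
--         w = 0
--         j = 0
--         for ch in chunk:
--             w |= (ord(ch) & 0xFF) << (24 - j * 8)
--             j += 1
--         words.append(w)
--         start += 4
--     return words
-- ===== Notes on version B (the rewrite author's own statement) =====
-- stated objective: simpler
-- what changed: B consumes the string in 4-character chunks, building each 32-bit word in one inner pass and appending exactly one word per chunk, instead of A's per-character loop with index arithmetic (i>>2, i%4) and while-based lazy list growth plus in-place |= updates.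
import Mathlib
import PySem

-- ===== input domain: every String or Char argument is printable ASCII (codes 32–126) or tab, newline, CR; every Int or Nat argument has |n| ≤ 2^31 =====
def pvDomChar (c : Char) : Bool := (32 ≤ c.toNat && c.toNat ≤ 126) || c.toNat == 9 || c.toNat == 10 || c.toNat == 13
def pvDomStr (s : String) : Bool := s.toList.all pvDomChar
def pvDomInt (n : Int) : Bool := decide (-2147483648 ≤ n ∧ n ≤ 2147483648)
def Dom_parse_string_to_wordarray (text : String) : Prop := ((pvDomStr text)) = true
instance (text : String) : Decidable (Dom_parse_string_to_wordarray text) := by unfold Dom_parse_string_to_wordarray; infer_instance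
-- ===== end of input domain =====

-- B repacks the same bytes chunk-wise (one word per 4-char chunk, one inner pass) instead of
-- A's per-character loop with lazy list growth and in-place |= updates; return values are equal.

-- ===== PORT A =====
-- while len(words) <= word_index: words.append(0)
def pvPadA (words : List Int) (wordIndex : Nat) : List Int :=
  if words.length ≤ wordIndex then pvPadA (words ++ [0]) wordIndex else words
termination_by wordIndex + 1 - words.length

-- one iteration of A's `for i in range(length)` body (text[i] is always in range)
def pvStepA (cs : List Char) (words : List Int) (i : Nat) : List Int :=
  let wordIndex := i >>> 2
  let words := pvPadA words wordIndex
  let charCode : Nat := (cs.getD i (Char.ofNat 0)).toNat &&& 255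
  let shift : Nat := 24 - (i % 4) * 8
  words.set wordIndex (Int.lor (words.getD wordIndex 0) ((charCode <<< shift : Nat) : Int))

def parse_string_to_wordarray (text : String) : List Int :=
  (List.range text.toList.length).foldl (pvStepA text.toList) []

-- ===== PORT B =====
-- w/j accumulator of B's inner `for ch in chunk` loop
def pvWordOf (chunk : List Char) : Int :=
  (chunk.foldl
    (fun (s : Int × Nat) c =>
      (Int.lor s.1 ((((c.toNat &&& 255) <<< (24 - s.2 * 8) : Nat)) : Int), s.2 + 1))
    (0, 0)).1

-- B's outer `while start < len(text):` loop; text[start:start+4] = take 4 (drop start)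
-- (exact here since 0 ≤ start and the stop bound only truncates at the end)
def pvGoB (cs : List Char) (start : Nat) : List Int :=
  if start < cs.length then
    pvWordOf ((cs.drop start).take 4) :: pvGoB cs (start + 4)
  else []
termination_by cs.length - start

def parse_string_to_wordarray_alt (text : String) : List Int :=
  pvGoB text.toList 0

-- ===== PRECONDITION & SPEC =====
def Spec_parse_string_to_wordarray (text : String) (out : List Int) : Prop := out = parse_string_to_wordarray_alt text
instance (text : String) (out : List Int) : Decidable (Spec_parse_string_to_wordarray text out) := by unfold Spec_parse_string_to_wordarray; infer_instance

-- ===== CLAIM (what is proved, stated in full; the proofs are below) =====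
def Claim_equal_parse_string_to_wordarray : Prop := ∀ (text : String), Dom_parse_string_to_wordarray text → Spec_parse_string_to_wordarray text (parse_string_to_wordarray text)

-- ===== LEMMAS AND PROOFS =====

def pvByte (c : Char) (r : Nat) : Int := (((c.toNat &&& 255) <<< (24 - r * 8) : Nat) : Int)

theorem pv_int_zero_lor (v : Int) : Int.lor 0 v = v := by
  cases v <;> simp [Int.lor, Nat.ldiff]

theorem pvGoB_stop (cs : List Char) (start : Nat) (h : cs.length ≤ start) :
    pvGoB cs start = [] := by
  rw [pvGoB]; simp [Nat.not_lt.mpr h]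

theorem pvGoB_step (cs : List Char) (start : Nat) (h : start < cs.length) :
    pvGoB cs start = pvWordOf ((cs.drop start).take 4) :: pvGoB cs (start + 4) := by
  rw [pvGoB]; simp [h]

theorem pvPadA_lt (words : List Int) (wordIndex : Nat) (h : wordIndex < words.length) :
    pvPadA words wordIndex = words := by
  rw [pvPadA]; simp [Nat.not_le.mpr h]

theorem pvPadA_eq (words : List Int) :
    pvPadA words words.length = words ++ [0] := by
  rw [pvPadA]
  simp only [le_refl, if_true]
  exact pvPadA_lt _ _ (by simp)

theorem pv_getD_last (ws : List Int) (x : Int) : (ws ++ [x]).getD ws.length 0 = x := by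
  induction ws with
  | nil => rfl
  | cons a t ih => simpa using ih

theorem pv_set_last (ws : List Int) (x y : Int) : (ws ++ [x]).set ws.length y = ws ++ [y] := by
  induction ws with
  | nil => rfl
  | cons a t ih => simpa using ih

theorem pv_step_first (cs : List Char) (ws : List Int) (m : Nat) (h : ws.length = m) :
    pvStepA cs ws (4 * m) = ws ++ [pvByte (cs.getD (4 * m) (Char.ofNat 0)) 0] := by
  have hwi : (4 * m) >>> 2 = m := by
    rw [Nat.shiftRight_eq_div_pow]
    show 4 * m / 4 = m
    omega
  have hmod : 4 * m % 4 = 0 := by omega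
  simp only [pvStepA]
  rw [hwi, hmod, ← h, pvPadA_eq, pv_getD_last, pv_set_last, pv_int_zero_lor, pvByte]

theorem pv_step_next (cs : List Char) (ws : List Int) (x : Int) (m r : Nat)
    (h : ws.length = m) (h1 : 1 ≤ r) (h4 : r < 4) :
    pvStepA cs (ws ++ [x]) (4 * m + r)
      = ws ++ [Int.lor x (pvByte (cs.getD (4 * m + r) (Char.ofNat 0)) r)] := by
  have hwi : (4 * m + r) >>> 2 = m := by
    rw [Nat.shiftRight_eq_div_pow]
    show (4 * m + r) / 4 = m
    omega
  have hmod : (4 * m + r) % 4 = r := by omega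
  have hlt : m < (ws ++ [x]).length := by simp [h]
  simp only [pvStepA]
  rw [hwi, hmod, pvPadA_lt _ _ hlt, ← h, pv_getD_last, pv_set_last, pvByte]

theorem pv_getD_of_drop (cs : List Char) (i j : Nat) (d : List Char)
    (hd : cs.drop i = d) : cs.getD (i + j) (Char.ofNat 0) = d.getD j (Char.ofNat 0) := by
  simp [List.getD_eq_getElem?_getD, ← hd, List.getElem?_drop]

theorem pv_loop_eq (cs : List Char) (n : Nat) : ∀ (d : List Char) (i : Nat) (ws : List Int),
    d.length ≤ n → cs.drop i = d → i = 4 * ws.length →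
    (List.range' i d.length).foldl (pvStepA cs) ws = ws ++ pvGoB cs i := by
  induction n with
  | zero =>
    intro d i ws hn hd hi
    have hnil : d = [] := by cases d <;> simp_all
    subst hnil
    have hlend : cs.length - i = 0 := by rw [← List.length_drop, hd]; rfl
    simp [pvGoB_stop cs i (by omega)]
  | succ n ih =>
    intro d i ws hn hd hi
    have g0 := pv_getD_of_drop cs i 0 d hd
    have g1 := pv_getD_of_drop cs i 1 d hd
    have g2 := pv_getD_of_drop cs i 2 d hd
    have g3 := pv_getD_of_drop cs i 3 d hd
    rw [hi] at g0 g1 g2 g3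
    simp only [Nat.add_zero] at g0
    have hlend : cs.length - i = d.length := by rw [← List.length_drop, hd]
    match d, hd, hlend, hn, g0, g1, g2, g3 with
    | [], hd, hlend, hn, g0, g1, g2, g3 =>
      simp [pvGoB_stop cs i (by simp at hlend; omega)]
    | [a], hd, hlend, hn, g0, g1, g2, g3 =>
      rw [pvGoB_step cs i (by simp at hlend; omega), hd,
        pvGoB_stop cs (i + 4) (by simp at hlend; omega)]
      rw [show List.range' i [a].length = [i] from rfl]
      rw [List.foldl_cons, List.foldl_nil, hi, pv_step_first cs ws ws.length rfl]
      rw [show [a].take 4 = [a] from rfl]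
      simp only [List.getD_cons_zero] at g0
      rw [g0]
      simp only [pvWordOf, pvByte, List.foldl_cons, List.foldl_nil, pv_int_zero_lor,
        Nat.zero_add]
    | [a, b], hd, hlend, hn, g0, g1, g2, g3 =>
      rw [pvGoB_step cs i (by simp at hlend; omega), hd,
        pvGoB_stop cs (i + 4) (by simp at hlend; omega)]
      rw [show List.range' i [a, b].length = [i, i + 1] from rfl]
      rw [List.foldl_cons, List.foldl_cons, List.foldl_nil, hi,
        pv_step_first cs ws ws.length rfl,
        pv_step_next cs ws _ ws.length 1 rfl (by omega) (by omega)]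
      rw [show [a, b].take 4 = [a, b] from rfl]
      simp only [List.getD_cons_zero, List.getD_cons_succ] at g0 g1
      rw [g0, g1]
      simp only [pvWordOf, pvByte, List.foldl_cons, List.foldl_nil, pv_int_zero_lor,
        Nat.zero_add]
    | [a, b, c], hd, hlend, hn, g0, g1, g2, g3 =>
      rw [pvGoB_step cs i (by simp at hlend; omega), hd,
        pvGoB_stop cs (i + 4) (by simp at hlend; omega)]
      rw [show List.range' i [a, b, c].length = [i, i + 1, i + 2] from rfl]
      rw [List.foldl_cons, List.foldl_cons, List.foldl_cons, List.foldl_nil, hi,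
        pv_step_first cs ws ws.length rfl,
        pv_step_next cs ws _ ws.length 1 rfl (by omega) (by omega),
        pv_step_next cs ws _ ws.length 2 rfl (by omega) (by omega)]
      rw [show [a, b, c].take 4 = [a, b, c] from rfl]
      simp only [List.getD_cons_zero, List.getD_cons_succ] at g0 g1 g2
      rw [g0, g1, g2]
      simp only [pvWordOf, pvByte, List.foldl_cons, List.foldl_nil, pv_int_zero_lor,
        Nat.zero_add]
    | a :: b :: c :: e :: rest, hd, hlend, hn, g0, g1, g2, g3 =>
      rw [pvGoB_step cs i (by simp at hlend; omega), hd]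
      have hlen : (a :: b :: c :: e :: rest).length = 4 + rest.length := by simp; omega
      rw [hlen]
      rw [show List.range' i (4 + rest.length) = List.range' i 4 ++ List.range' (i + 4) rest.length
        from by rw [List.range'_append]]
      rw [List.foldl_append]
      rw [show List.range' i 4 = [i, i + 1, i + 2, i + 3] from rfl]
      rw [List.foldl_cons, List.foldl_cons, List.foldl_cons, List.foldl_cons,
        List.foldl_nil, hi,
        pv_step_first cs ws ws.length rfl,
        pv_step_next cs ws _ ws.length 1 rfl (by omega) (by omega),
        pv_step_next cs ws _ ws.length 2 rfl (by omega) (by omega),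
        pv_step_next cs ws _ ws.length 3 rfl (by omega) (by omega)]
      have hdrop : cs.drop (i + 4) = rest := by
        rw [show i + 4 = (i + 1) + 1 + 1 + 1 from rfl]
        simp only [← List.drop_drop, hd]
        rfl
      have hrec := ih rest (i + 4)
        (ws ++ [Int.lor (Int.lor (Int.lor (pvByte (cs.getD (4 * ws.length) (Char.ofNat 0)) 0)
          (pvByte (cs.getD (4 * ws.length + 1) (Char.ofNat 0)) 1))
          (pvByte (cs.getD (4 * ws.length + 2) (Char.ofNat 0)) 2))
          (pvByte (cs.getD (4 * ws.length + 3) (Char.ofNat 0)) 3)])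
        (by simp at hn; omega) hdrop (by simp; omega)
      rw [hi] at hrec
      rw [hrec]
      rw [show (a :: b :: c :: e :: rest).take 4 = [a, b, c, e] from rfl]
      simp only [List.getD_cons_zero, List.getD_cons_succ] at g0 g1 g2 g3
      rw [g0, g1, g2, g3]
      simp only [pvWordOf, pvByte, List.foldl_cons, List.foldl_nil, pv_int_zero_lor,
        Nat.zero_add, List.append_assoc, List.cons_append, List.nil_append]

-- ===== VERDICT (by name: the statement is the Claim_ definition above) =====
theorem parse_string_to_wordarray_spec : Claim_equal_parse_string_to_wordarray := by
  intro text _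
  unfold Spec_parse_string_to_wordarray parse_string_to_wordarray parse_string_to_wordarray_alt
  rw [List.range_eq_range']
  simpa using pv_loop_eq text.toList text.toList.length text.toList 0 [] (le_refl _) rfl rfl
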